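-- pv_equiv track=rewrite | github.com/petz1209/aoc_python_2022 | challenge1/challenge1.py | calculate_calories_per_elf
-- ===== SOURCE A (Python) =====
-- def calculate_calories_per_elf(data):
--     """sums up all items in list if they are of != """""
--     # sum up calories per elf
--     elf_calories = list()
--     cur_elf = 0
--     for item in data:
--         if item:
--             cur_elf += int(item)
--         else:
--             elf_calories.append(cur_elf)
--             cur_elf = 0
--     elf_calories.sort()
--     return elf_calories
-- ===== SOURCE B (Python) =====
-- def calculate_calories_per_elf(data):
--     # Stage 1: parse every item up front; None marks an elf separator.
--     vals = [int(x) if x else None for x in data]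
--     # Stage 2: separator-driven recursion: split at the first None, sum the slice
--     # before it, recurse on the slice after it; the unterminated trailing group
--     # (no separator after it) never produces a sum, as in A.
--     def group_sums(rest):
--         if None not in rest:
--             return []
--         k = rest.index(None)
--         return [sum(rest[:k])] + group_sums(rest[k + 1:])
--     return sorted(group_sums(vals))
-- ===== Notes on version B (the rewrite author's own statement) =====
-- stated objective: alternative
-- what changed: Replaces A's element-by-element running-sum loop with a two-stage design: first parse every item into a list with None marking separators, then a separator-driven recursion that finds the first None with index, sums the slice before it and recurses on the slice after it (the trailing unterminated group naturally yields nothing, as in A).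
import Mathlib
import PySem

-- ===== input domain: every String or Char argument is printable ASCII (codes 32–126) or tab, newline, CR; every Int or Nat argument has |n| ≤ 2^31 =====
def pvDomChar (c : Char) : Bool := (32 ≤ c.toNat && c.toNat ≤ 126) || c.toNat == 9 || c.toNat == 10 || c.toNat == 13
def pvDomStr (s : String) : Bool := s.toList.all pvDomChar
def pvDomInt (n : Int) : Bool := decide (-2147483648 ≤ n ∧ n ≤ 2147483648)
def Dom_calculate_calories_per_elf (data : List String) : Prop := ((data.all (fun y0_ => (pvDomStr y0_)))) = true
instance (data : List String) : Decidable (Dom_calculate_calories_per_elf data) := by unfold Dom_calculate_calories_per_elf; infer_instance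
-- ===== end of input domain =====

-- B replaces A's element-by-element running-sum loop with a two-stage design: parse every
-- item up front (None = separator), then a separator-driven recursion that splits at the
-- first separator, sums the slice before it and recurses on the slice after it.

-- ===== PORT A =====
-- A: running scalar accumulator; append the sum on each separator; sort in place.
def calculate_calories_per_elf (data : List String) : List Int :=
  let st := data.foldl
    (fun (st : List Int × Int) item =>
      if item ≠ "" then (st.1, st.2 + (PySem.Int.ofStr? item).getD 0)
      else (st.1 ++ [st.2], 0))
    ([], 0)
  PySem.List.sorted st.1 (fun x => x)

-- ===== PORT B =====
-- B's helper group_sums: split at the first None (rest.index(None)), sum rest[:k]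
-- (sum of plain ints: the slice before the first None contains no None, so '.getD 0'
-- is exact there), recurse on rest[k+1:].
def pvGroupSums (rest : List (Option Int)) : List Int :=
  match h : PySem.List.index? rest none with
  | none => []
  | some k =>
      ((PySem.List.slice rest none (some (k : Int))).foldl
        (fun a o => a + o.getD 0) 0)
        :: pvGroupSums (PySem.List.slice rest (some ((k : Int) + 1)) none)
termination_by rest.length
decreasing_by
  have hk := PySem.List.getElem_of_index?_eq_some h
  obtain ⟨hklt, -, -⟩ := hk
  have : PySem.List.slice rest (some ((k : Int) + 1)) none = rest.drop (k + 1) := by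
    have := PySem.List.slice_from_natCast (xs := rest) (a := k + 1)
    simpa using this
  rw [this]
  simp [List.length_drop]
  omega

-- B: vals = [int(x) if x else None for x in data], then sorted(group_sums(vals)).
def calculate_calories_per_elf_alt (data : List String) : List Int :=
  let vals := data.map (fun x => if x ≠ "" then some ((PySem.Int.ofStr? x).getD 0) else none)
  PySem.List.sorted (pvGroupSums vals) (fun x => x)

-- ===== PRECONDITION & SPEC =====
-- Pre_ excludes exactly the inputs on which Python's int(item) raises ValueError.
def Pre_calculate_calories_per_elf (data : List String) : Prop :=
  ∀ s ∈ data, s ≠ "" → (PySem.Int.ofStr? s).isSome = true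
instance (data : List String) : Decidable (Pre_calculate_calories_per_elf data) := by unfold Pre_calculate_calories_per_elf; infer_instance
def pvWitness_calculate_calories_per_elf : List String := ["100", "200", "", "7", ""]
def Spec_calculate_calories_per_elf (data : List String) (out : List Int) : Prop := out = calculate_calories_per_elf_alt data
instance (data : List String) (out : List Int) : Decidable (Spec_calculate_calories_per_elf data out) := by unfold Spec_calculate_calories_per_elf; infer_instance

-- ===== CLAIM (what is proved, stated in full; the proofs are below) =====
def Claim_equal_calculate_calories_per_elf : Prop := ∀ (data : List String), Dom_calculate_calories_per_elf data → Pre_calculate_calories_per_elf data → Spec_calculate_calories_per_elf data (calculate_calories_per_elf data)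

-- ===== LEMMAS AND PROOFS =====

-- B's stage-1 parse map, named for the proofs
def pvParse (x : String) : Option Int :=
  if x ≠ "" then some ((PySem.Int.ofStr? x).getD 0) else none

-- proof-only helper: A's loop written as a structural recursion carrying the running sum
def pvGsC (c : Int) : List String → List Int
  | [] => []
  | x :: xs => if x ≠ "" then pvGsC (c + (PySem.Int.ofStr? x).getD 0) xs else c :: pvGsC 0 xs

theorem pv_fold_eq (data : List String) (acc : List Int) (c : Int) :
    (data.foldl
      (fun (st : List Int × Int) item =>
        if item ≠ "" then (st.1, st.2 + (PySem.Int.ofStr? item).getD 0)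
        else (st.1 ++ [st.2], 0))
      (acc, c)).1 = acc ++ pvGsC c data := by
  induction data generalizing acc c with
  | nil => simp [pvGsC]
  | cons x xs ih =>
    by_cases hx : x = ""
    · subst hx
      simpa [pvGsC] using ih (acc ++ [c]) 0
    · simpa [pvGsC, hx] using ih acc (c + (PySem.Int.ofStr? x).getD 0)

theorem pvGroupSums_eq (rest : List (Option Int)) :
    pvGroupSums rest = match PySem.List.index? rest none with
      | none => []
      | some k =>
          ((PySem.List.slice rest none (some (k : Int))).foldl
            (fun a o => a + o.getD 0) 0)
            :: pvGroupSums (PySem.List.slice rest (some ((k : Int) + 1)) none) := by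
  rw [pvGroupSums]
  split
  next h' => rw [h']
  next k' h' => rw [h']

theorem pv_gsC_no_sep (l : List String) (c : Int) (h : "" ∉ l) : pvGsC c l = [] := by
  induction l generalizing c with
  | nil => simp [pvGsC]
  | cons x xs ih =>
    have hx : x ≠ "" := by intro hx; exact h (hx ▸ List.mem_cons_self)
    simp [pvGsC, hx, ih _ (fun hm => h (List.mem_cons_of_mem _ hm))]

theorem pv_gsC_append (pre suf : List String) (c : Int) (h : "" ∉ pre) :
    pvGsC c (pre ++ "" :: suf)
      = (c + (pre.map (fun s => (PySem.Int.ofStr? s).getD 0)).sum) :: pvGsC 0 suf := by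
  induction pre generalizing c with
  | nil => simp [pvGsC]
  | cons x xs ih =>
    have hx : x ≠ "" := by intro hx; exact h (hx ▸ List.mem_cons_self)
    have hxs : "" ∉ xs := fun hm => h (List.mem_cons_of_mem _ hm)
    rw [List.cons_append]
    simp only [pvGsC, if_pos hx]
    rw [ih _ hxs]
    simp [add_assoc]

theorem pv_gs_eq (data : List String) : pvGroupSums (data.map pvParse) = pvGsC 0 data := by
  induction hn : data.length using Nat.strong_induction_on generalizing data with
  | _ n ih =>
    match hidx : PySem.List.index? (data.map pvParse) none with
    | none =>
      have hnot : (none : Option Int) ∉ data.map pvParse :=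
        (PySem.List.index?_eq_none_iff _ _).mp hidx
      have hsep : "" ∉ data := by
        intro hm
        exact hnot (List.mem_map.mpr ⟨"", hm, by simp [pvParse]⟩)
      rw [pvGroupSums_eq, hidx]
      exact (pv_gsC_no_sep data 0 hsep).symm
    | some k =>
      obtain ⟨P, S, hmap, hlen, hP⟩ := (PySem.List.index?_eq_some_iff _ _ _).mp hidx
      rw [List.map_eq_append_iff] at hmap
      obtain ⟨pre, l₂, hdata, hpreP, h2⟩ := hmap
      rw [List.map_eq_cons_iff] at h2
      obtain ⟨x, suf, hl₂, hfx, hsufS⟩ := h2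
      have hx : x = "" := by
        by_contra hxne
        simp [pvParse, hxne] at hfx
      have hpre : "" ∉ pre := by
        intro hm
        exact hP (hpreP ▸ List.mem_map.mpr ⟨"", hm, by simp [pvParse]⟩)
      have hslice1 : PySem.List.slice (data.map pvParse) none (some (k : Int)) = pre.map pvParse := by
        rw [PySem.List.slice_to_natCast, hdata, hl₂, ← hlen, ← hpreP]
        simp [List.take_left']
      have hslice2 : PySem.List.slice (data.map pvParse) (some ((k : Int) + 1)) none = suf.map pvParse := by
        have h1 := PySem.List.slice_from_natCast (xs := data.map pvParse) (a := k + 1)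
        rw [show ((k : Int) + 1) = ((k + 1 : Nat) : Int) by push_cast; ring, h1,
          hdata, hl₂, ← hlen, ← hpreP, List.map_append]
        rw [show pre.map pvParse ++ (x :: suf).map pvParse
              = ((pre.map pvParse) ++ [pvParse x]) ++ suf.map pvParse by simp,
          show (pre.map pvParse).length + 1 = ((pre.map pvParse) ++ [pvParse x]).length by simp]
        exact List.drop_left
      have hrec : pvGroupSums (suf.map pvParse) = pvGsC 0 suf := by
        apply ih suf.length _ suf rfl
        subst hdata hl₂ hn; simp; omega
      rw [pvGroupSums_eq, hidx]
      show ((PySem.List.slice (data.map pvParse) none (some (k : Int))).foldl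
            (fun a o => a + o.getD 0) 0)
          :: pvGroupSums (PySem.List.slice (data.map pvParse) (some ((k : Int) + 1)) none)
        = pvGsC 0 data
      rw [hslice1, hslice2, hrec, hdata, hl₂, hx, pv_gsC_append pre suf 0 hpre,
        PySem.List.foldl_add, List.map_map]
      have : (pre.map (fun o => (pvParse o).getD 0 : String → Int))
           = pre.map (fun s => (PySem.Int.ofStr? s).getD 0) := by
        apply List.map_congr_left
        intro s hs
        have : s ≠ "" := fun h => hpre (h ▸ hs)
        simp [pvParse, this]
      rw [show ((fun o => Option.getD o 0) ∘ pvParse) = (fun s => (pvParse s).getD 0) from rfl, this]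

-- ===== VERDICT (by name: the statement is the Claim_ definition above) =====
theorem calculate_calories_per_elf_spec : Claim_equal_calculate_calories_per_elf := by
  intro data _ _
  show PySem.List.sorted
      (data.foldl
        (fun (st : List Int × Int) item =>
          if item ≠ "" then (st.1, st.2 + (PySem.Int.ofStr? item).getD 0)
          else (st.1 ++ [st.2], 0))
        ([], 0)).1 (fun x => x)
    = PySem.List.sorted
        (pvGroupSums (data.map (fun x => if x ≠ "" then some ((PySem.Int.ofStr? x).getD 0) else none)))
        (fun x => x)
  rw [pv_fold_eq data [] 0,
    show (fun x => if x ≠ "" then some ((PySem.Int.ofStr? x).getD 0) else none) = pvParse from rfl,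
    pv_gs_eq]
  simp
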